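-- pv_equiv track=rewrite | github.com/riffsircar/blend-elites | get_label.py | get_label_blend
-- ===== SOURCE A (Python) =====
-- def get_label_blend(level):
-- 	# E/t/H, D, |, </>/[/], ?/Q, o/L/U/*/+/W/l/w, M, T/C, S/B, X/#
-- 	# i.e. enemy, hazard, door, ladder, pipe, SMB QM, SMB/MM collectable, moving, fixed, breakable
-- 	label = [False] * 9
-- 	temp = ''
-- 	for l in level:
-- 		temp += ''.join(l)
-- 	if 'E' in temp or 't' in temp or 'H' in temp:
-- 		label[0] = True
-- 	if 'D' in temp:
-- 		label[1] = True
-- 	if '|' in temp: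
-- 		label[2] = True
-- 	if '[' in temp and ']' in temp and '<' in temp and '>' in temp:
-- 		label[3] = True
-- 	if 'Q' in temp or '?' in temp:
-- 		label[4] = True
-- 	if '*' in temp or 'U' in temp or 'W' in temp or 'w' in temp or '+' in temp or 'l' in temp or 'L' in temp or 'o' in temp:
-- 		label[5] = True
-- 	if 'M' in temp:
-- 		label[6] = True
-- 	if 'T' in temp or 'C' in temp:
-- 		label[7] = True
-- 	if 'S' in temp or 'B' in temp:
-- 		label[8] = True
-- 	return label
-- ===== SOURCE B (Python) =====
-- # Single pass over every character with a char->category dict; the door flag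
-- # (needs all four of '[' ']' '<' '>') is resolved after the pass from a seen-set.
-- _CAT = {'E': 0, 't': 0, 'H': 0, 'D': 1, '|': 2, 'Q': 4, '?': 4,
--         'o': 5, 'L': 5, 'U': 5, '*': 5, '+': 5, 'W': 5, 'l': 5, 'w': 5,
--         'M': 6, 'T': 7, 'C': 7, 'S': 8, 'B': 8}
-- _DOORS = {'[', ']', '<', '>'}
--
-- def get_label_blend(level):
--     label = [False] * 9
--     doors = set()
--     for row in level:
--         for s in row:
--             for ch in s:
--                 idx = _CAT.get(ch)
--                 if idx is not None:
--                     label[idx] = True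
--                 elif ch in _DOORS:
--                     doors.add(ch)
--     label[3] = _DOORS <= doors
--     return label
-- ===== Notes on version B (the rewrite author's own statement) =====
-- stated objective: alternative
-- what changed: Instead of concatenating all rows into one string and re-scanning it with ~20 substring tests, B makes a single pass over every character using a char-to-category dict to set flags inline, collecting door characters in a seen-set and resolving the all-four door flag after the pass.
import Mathlib
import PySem

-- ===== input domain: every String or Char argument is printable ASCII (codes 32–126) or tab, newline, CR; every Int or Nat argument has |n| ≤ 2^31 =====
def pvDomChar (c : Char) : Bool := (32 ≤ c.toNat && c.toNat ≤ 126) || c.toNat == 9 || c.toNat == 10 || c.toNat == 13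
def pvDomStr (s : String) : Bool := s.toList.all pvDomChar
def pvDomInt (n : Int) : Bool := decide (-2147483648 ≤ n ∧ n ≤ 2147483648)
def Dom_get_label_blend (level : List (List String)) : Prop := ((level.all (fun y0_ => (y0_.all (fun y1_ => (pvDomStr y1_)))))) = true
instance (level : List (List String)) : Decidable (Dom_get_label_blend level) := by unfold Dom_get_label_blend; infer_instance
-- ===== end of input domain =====

-- B replaces A's concatenate-then-rescan-per-category structure by a single pass over
-- every character with a char → category-index dict, resolving the all-four door flag
-- after the pass from a seen-set (objective: alternative decomposition, one traversal).

-- ===== PORT A =====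
-- strings are handled on the List Char side (PySem.Chars), exact per PYSEM.md
def get_label_blend (level : List (List String)) : List Bool :=
  let label := List.replicate 9 false
  let temp : List Char :=
    level.foldl (fun t l => t ++ PySem.Chars.join [] (l.map String.toList)) []
  let label := if PySem.Chars.isIn ['E'] temp || PySem.Chars.isIn ['t'] temp || PySem.Chars.isIn ['H'] temp
               then PySem.List.pySetD label 0 true else label
  let label := if PySem.Chars.isIn ['D'] temp then PySem.List.pySetD label 1 true else label
  let label := if PySem.Chars.isIn ['|'] temp then PySem.List.pySetD label 2 true else label
  let label := if PySem.Chars.isIn ['['] temp && PySem.Chars.isIn [']'] temp &&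
                  PySem.Chars.isIn ['<'] temp && PySem.Chars.isIn ['>'] temp
               then PySem.List.pySetD label 3 true else label
  let label := if PySem.Chars.isIn ['Q'] temp || PySem.Chars.isIn ['?'] temp
               then PySem.List.pySetD label 4 true else label
  let label := if PySem.Chars.isIn ['*'] temp || PySem.Chars.isIn ['U'] temp || PySem.Chars.isIn ['W'] temp ||
                  PySem.Chars.isIn ['w'] temp || PySem.Chars.isIn ['+'] temp || PySem.Chars.isIn ['l'] temp ||
                  PySem.Chars.isIn ['L'] temp || PySem.Chars.isIn ['o'] temp
               then PySem.List.pySetD label 5 true else label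
  let label := if PySem.Chars.isIn ['M'] temp then PySem.List.pySetD label 6 true else label
  let label := if PySem.Chars.isIn ['T'] temp || PySem.Chars.isIn ['C'] temp
               then PySem.List.pySetD label 7 true else label
  let label := if PySem.Chars.isIn ['S'] temp || PySem.Chars.isIn ['B'] temp
               then PySem.List.pySetD label 8 true else label
  label

-- ===== PORT B =====
-- the module-level dict _CAT and set _DOORS of Source B
def pvCatD : PySem.Dict Char Int :=
  PySem.Dict.ofList [('E', 0), ('t', 0), ('H', 0), ('D', 1), ('|', 2), ('Q', 4), ('?', 4),
                     ('o', 5), ('L', 5), ('U', 5), ('*', 5), ('+', 5), ('W', 5), ('l', 5), ('w', 5),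
                     ('M', 6), ('T', 7), ('C', 7), ('S', 8), ('B', 8)]
def pvDoorsB : PySem.Set Char := PySem.Set.ofList ['[', ']', '<', '>']

-- body of Source B's innermost loop: classify one character
def pvStepB (st : List Bool × PySem.Set Char) (ch : Char) : List Bool × PySem.Set Char :=
  match PySem.Dict.get? pvCatD ch with
  | some idx => (PySem.List.pySetD st.1 idx true, st.2)
  | none => if PySem.Set.contains pvDoorsB ch then (st.1, PySem.Set.add st.2 ch) else st

def get_label_blend_alt (level : List (List String)) : List Bool :=
  let init : List Bool × PySem.Set Char := (List.replicate 9 false, PySem.Set.empty)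
  let fin := level.foldl (fun st row => row.foldl (fun st s => s.toList.foldl pvStepB st) st) init
  PySem.List.pySetD fin.1 3 (PySem.Set.issubset pvDoorsB fin.2)

-- ===== PRECONDITION & SPEC =====
def Spec_get_label_blend (level : List (List String)) (out : List Bool) : Prop := out = get_label_blend_alt level
instance (level : List (List String)) (out : List Bool) : Decidable (Spec_get_label_blend level out) := by unfold Spec_get_label_blend; infer_instance

-- ===== CLAIM (what is proved, stated in full; the proofs are below) =====
def Claim_equal_get_label_blend : Prop := ∀ (level : List (List String)), Dom_get_label_blend level → Spec_get_label_blend level (get_label_blend level)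

-- ===== LEMMAS AND PROOFS =====

-- the full character stream of the level, in traversal order
def pvChars (level : List (List String)) : List Char :=
  level.flatMap (fun row => row.flatMap String.toList)

-- B's per-index hit predicate: some character of cs is mapped to index j by the dict
def pvHit (cs : List Char) (j : Nat) : Bool :=
  cs.any (fun c => PySem.Dict.get? pvCatD c == some (j : Int))

lemma pvBoolExt (a b : Bool) (h : a = true ↔ b = true) : a = b := by
  cases a <;> cases b <;> simp_all

-- Python's single-char 'c in temp' is list membership
lemma pvIsIn_singleton (c : Char) (s : List Char) :
    PySem.Chars.isIn [c] s = decide (c ∈ s) := by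
  apply pvBoolExt
  rw [PySem.Chars.isIn_iff_infix, decide_eq_true_eq]
  constructor
  · intro h; exact h.sublist.subset (by simp)
  · intro h; obtain ⟨a, b, rfl⟩ := List.append_of_mem h; exact ⟨a, b, by simp⟩

lemma pvJoinNil (parts : List (List Char)) : PySem.Chars.join [] parts = parts.flatten := by
  show List.intercalate [] parts = parts.flatten
  induction parts with
  | nil => simp [List.intercalate]
  | cons p ps ih => cases ps <;> simp_all [List.intercalate, List.intersperse]

lemma pvFoldAppend {α β : Type} (f : β → List α) (l : List β) : ∀ (acc : List α),
    l.foldl (fun t x => t ++ f x) acc = acc ++ l.flatMap f := by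
  induction l with
  | nil => intro acc; simp
  | cons x xs ih => intro acc; simp [ih]

-- A's temp is the character stream
lemma pvTempEq (level : List (List String)) :
    level.foldl (fun t l => t ++ PySem.Chars.join [] (l.map String.toList)) [] = pvChars level := by
  rw [pvFoldAppend]
  simp [pvChars, pvJoinNil, List.flatMap_def]

-- B's nested loops are one fold over the character stream
lemma pvRowFold (row : List String) : ∀ st : List Bool × PySem.Set Char,
    row.foldl (fun st s => s.toList.foldl pvStepB st) st = (row.flatMap String.toList).foldl pvStepB st := by
  induction row with
  | nil => intro st; simp
  | cons s rs ih => intro st; simp [List.foldl_append, ih]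

lemma pvLevelFold (level : List (List String)) : ∀ st : List Bool × PySem.Set Char,
    level.foldl (fun st row => row.foldl (fun st s => s.toList.foldl pvStepB st) st) st
      = (pvChars level).foldl pvStepB st := by
  induction level with
  | nil => intro st; simp [pvChars]
  | cons row rows ih =>
    intro st
    simp only [List.foldl_cons, pvChars, List.flatMap_cons, List.foldl_append]
    rw [pvRowFold, ih]
    rfl

-- dict facts
lemma pvCat_mem {c : Char} {i : Int} (h : PySem.Dict.get? pvCatD c = some i) :
    (c, i) ∈ [('E', (0:Int)), ('t', 0), ('H', 0), ('D', 1), ('|', 2), ('Q', 4), ('?', 4),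
              ('o', 5), ('L', 5), ('U', 5), ('*', 5), ('+', 5), ('W', 5), ('l', 5), ('w', 5),
              ('M', 6), ('T', 7), ('C', 7), ('S', 8), ('B', 8)] := by
  have hmem := PySem.Dict.mem_items_of_get?_eq_some _ h
  have hitems : pvCatD.items = [('E', (0:Int)), ('t', 0), ('H', 0), ('D', 1), ('|', 2), ('Q', 4), ('?', 4),
              ('o', 5), ('L', 5), ('U', 5), ('*', 5), ('+', 5), ('W', 5), ('l', 5), ('w', 5),
              ('M', 6), ('T', 7), ('C', 7), ('S', 8), ('B', 8)] := by decide
  rwa [hitems] at hmem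

lemma pvCat_nonneg {c : Char} {i : Int} (h : PySem.Dict.get? pvCatD c = some i) : 0 ≤ i ∧ i < 9 := by
  have := pvCat_mem h
  simp only [List.mem_cons, List.not_mem_nil, or_false, Prod.mk.injEq] at this
  rcases this with ⟨_,rfl⟩|⟨_,rfl⟩|⟨_,rfl⟩|⟨_,rfl⟩|⟨_,rfl⟩|⟨_,rfl⟩|⟨_,rfl⟩|⟨_,rfl⟩|⟨_,rfl⟩|⟨_,rfl⟩|⟨_,rfl⟩|⟨_,rfl⟩|⟨_,rfl⟩|⟨_,rfl⟩|⟨_,rfl⟩|⟨_,rfl⟩|⟨_,rfl⟩|⟨_,rfl⟩|⟨_,rfl⟩|⟨_,rfl⟩ <;> omega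

lemma pvCat_not_door {c : Char} {i : Int} (h : PySem.Dict.get? pvCatD c = some i) :
    c ∉ (pvDoorsB : List Char) := by
  have := pvCat_mem h
  simp only [List.mem_cons, List.not_mem_nil, or_false, Prod.mk.injEq] at this
  rcases this with ⟨rfl,_⟩|⟨rfl,_⟩|⟨rfl,_⟩|⟨rfl,_⟩|⟨rfl,_⟩|⟨rfl,_⟩|⟨rfl,_⟩|⟨rfl,_⟩|⟨rfl,_⟩|⟨rfl,_⟩|⟨rfl,_⟩|⟨rfl,_⟩|⟨rfl,_⟩|⟨rfl,_⟩|⟨rfl,_⟩|⟨rfl,_⟩|⟨rfl,_⟩|⟨rfl,_⟩|⟨rfl,_⟩|⟨rfl,_⟩ <;> decide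

-- loop invariant, label half: entry j of the label is initial-or-hit
lemma pvFold_label (cs : List Char) (l : List Bool) (d : PySem.Set Char) :
    (cs.foldl pvStepB (l, d)).1 = l.mapIdx (fun j b => b || pvHit cs j) := by
  induction cs generalizing l d with
  | nil =>
    simp only [List.foldl_nil, pvHit, List.any_nil, Bool.or_false]
    apply List.ext_getElem <;> simp
  | cons c rest ih =>
    simp only [List.foldl_cons]
    rcases hc : PySem.Dict.get? pvCatD c with _ | i
    · have hstep : pvStepB (l, d) c =
          if PySem.Set.contains pvDoorsB c then (l, PySem.Set.add d c) else (l, d) := by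
        simp [pvStepB, hc]
      rw [hstep]
      have key : ∀ d' : PySem.Set Char, (rest.foldl pvStepB (l, d')).1 =
          l.mapIdx (fun j b => b || pvHit (c :: rest) j) := by
        intro d'
        rw [ih l d']
        apply List.ext_getElem
        · simp
        · intro j hj1 hj2
          simp only [List.getElem_mapIdx, pvHit, List.any_cons, hc]
          simp
      split <;> exact key _
    · have h09 := pvCat_nonneg hc
      have hstep : pvStepB (l, d) c = (PySem.List.pySetD l i true, d) := by
        simp [pvStepB, hc]
      rw [hstep, ih]
      rw [PySem.List.pySetD_of_nonneg l true h09.1]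
      apply List.ext_getElem
      · simp
      · intro j hj1 hj2
        simp only [List.getElem_mapIdx, List.getElem_set]
        by_cases hji : i.toNat = j
        · have : (PySem.Dict.get? pvCatD c == some ((j : Nat) : Int)) = true := by
            simp [hc]; omega
          simp [hji, pvHit, this]
        · have : (PySem.Dict.get? pvCatD c == some ((j : Nat) : Int)) = false := by
            simp [hc]; omega
          simp [hji, pvHit, this]

-- loop invariant, door half: the seen-set holds exactly the door characters seen
lemma pvFold_doors (cs : List Char) (l : List Bool) (d : PySem.Set Char) (x : Char) :
    x ∈ (cs.foldl pvStepB (l, d)).2 ↔ x ∈ d ∨ (x ∈ cs ∧ x ∈ (pvDoorsB : List Char)) := by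
  induction cs generalizing l d with
  | nil => simp
  | cons c rest ih =>
    simp only [List.foldl_cons]
    rcases hc : PySem.Dict.get? pvCatD c with _ | i
    · by_cases hcd : c ∈ (pvDoorsB : List Char)
      · have hstep : pvStepB (l, d) c = (l, PySem.Set.add d c) := by
          simp [pvStepB, hc, hcd]
        rw [hstep, ih]
        simp only [PySem.Set.mem_add, List.mem_cons]
        constructor
        · rintro ((h|rfl)|h)
          · exact Or.inl h
          · exact Or.inr ⟨Or.inl rfl, hcd⟩
          · exact Or.inr ⟨Or.inr h.1, h.2⟩
        · rintro (h|⟨(rfl|h),hd2⟩)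
          · exact Or.inl (Or.inl h)
          · exact Or.inl (Or.inr rfl)
          · exact Or.inr ⟨h, hd2⟩
      · have hstep : pvStepB (l, d) c = (l, d) := by
          simp [pvStepB, hc, hcd]
        rw [hstep, ih]
        constructor
        · rintro (h|h)
          · exact Or.inl h
          · exact Or.inr ⟨List.mem_cons_of_mem _ h.1, h.2⟩
        · rintro (h|⟨hmem,hd2⟩)
          · exact Or.inl h
          · rcases List.mem_cons.mp hmem with rfl|h
            · exact absurd hd2 hcd
            · exact Or.inr ⟨h, hd2⟩
    · have hstep : pvStepB (l, d) c = (PySem.List.pySetD l i true, d) := by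
        simp [pvStepB, hc]
      rw [hstep, ih]
      have hcd := pvCat_not_door hc
      constructor
      · rintro (h|h)
        · exact Or.inl h
        · exact Or.inr ⟨List.mem_cons_of_mem _ h.1, h.2⟩
      · rintro (h|⟨hmem,hd2⟩)
        · exact Or.inl h
        · rcases List.mem_cons.mp hmem with rfl|h
          · exact absurd hd2 hcd
          · exact Or.inr ⟨h, hd2⟩

-- A's if/assignment chain, as one decidable fact over its nine conditions
lemma pvChainA : ∀ (c0 c1 c2 c3 c4 c5 c6 c7 c8 : Bool),
    (let l0 := List.replicate 9 false
     let l1 := if c0 then PySem.List.pySetD l0 0 true else l0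
     let l2 := if c1 then PySem.List.pySetD l1 1 true else l1
     let l3 := if c2 then PySem.List.pySetD l2 2 true else l2
     let l4 := if c3 then PySem.List.pySetD l3 3 true else l3
     let l5 := if c4 then PySem.List.pySetD l4 4 true else l4
     let l6 := if c5 then PySem.List.pySetD l5 5 true else l5
     let l7 := if c6 then PySem.List.pySetD l6 6 true else l6
     let l8 := if c7 then PySem.List.pySetD l7 7 true else l7
     if c8 then PySem.List.pySetD l8 8 true else l8)
    = [c0, c1, c2, c3, c4, c5, c6, c7, c8] := by decide

lemma pvA_eq (level : List (List String)) :
    get_label_blend level =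
      (let temp : List Char :=
        level.foldl (fun t l => t ++ PySem.Chars.join [] (l.map String.toList)) []
       [PySem.Chars.isIn ['E'] temp || PySem.Chars.isIn ['t'] temp || PySem.Chars.isIn ['H'] temp,
        PySem.Chars.isIn ['D'] temp,
        PySem.Chars.isIn ['|'] temp,
        PySem.Chars.isIn ['['] temp && PySem.Chars.isIn [']'] temp &&
          PySem.Chars.isIn ['<'] temp && PySem.Chars.isIn ['>'] temp,
        PySem.Chars.isIn ['Q'] temp || PySem.Chars.isIn ['?'] temp,
        PySem.Chars.isIn ['*'] temp || PySem.Chars.isIn ['U'] temp || PySem.Chars.isIn ['W'] temp ||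
          PySem.Chars.isIn ['w'] temp || PySem.Chars.isIn ['+'] temp || PySem.Chars.isIn ['l'] temp ||
          PySem.Chars.isIn ['L'] temp || PySem.Chars.isIn ['o'] temp,
        PySem.Chars.isIn ['M'] temp,
        PySem.Chars.isIn ['T'] temp || PySem.Chars.isIn ['C'] temp,
        PySem.Chars.isIn ['S'] temp || PySem.Chars.isIn ['B'] temp]) := by
  exact pvChainA _ _ _ _ _ _ _ _ _

lemma pvMapIdxRep (f : Nat → Bool) :
    List.mapIdx (fun j (b : Bool) => b || f j) (List.replicate 9 false)
    = [f 0, f 1, f 2, f 3, f 4, f 5, f 6, f 7, f 8] := by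
  simp [List.replicate, List.mapIdx_cons]

-- per-index characterisations of pvHit
lemma pvHit0 (cs : List Char) :
    pvHit cs 0 = (decide ('E' ∈ cs) || decide ('t' ∈ cs) || decide ('H' ∈ cs)) := by
  apply pvBoolExt
  simp only [pvHit, List.any_eq_true, beq_iff_eq, Bool.or_eq_true, decide_eq_true_eq]
  constructor
  · rintro ⟨c, hc, h⟩
    have := pvCat_mem h
    simp at this
    rcases this with rfl|rfl|rfl <;> tauto
  · rintro ((h|h)|h) <;> exact ⟨_, h, by decide⟩

lemma pvHit1 (cs : List Char) : pvHit cs 1 = decide ('D' ∈ cs) := by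
  apply pvBoolExt
  simp only [pvHit, List.any_eq_true, beq_iff_eq, decide_eq_true_eq]
  constructor
  · rintro ⟨c, hc, h⟩
    have := pvCat_mem h
    simp at this
    subst this; exact hc
  · intro h; exact ⟨_, h, by decide⟩

lemma pvHit2 (cs : List Char) : pvHit cs 2 = decide ('|' ∈ cs) := by
  apply pvBoolExt
  simp only [pvHit, List.any_eq_true, beq_iff_eq, decide_eq_true_eq]
  constructor
  · rintro ⟨c, hc, h⟩
    have := pvCat_mem h
    simp at this
    subst this; exact hc
  · intro h; exact ⟨_, h, by decide⟩

lemma pvHit3 (cs : List Char) : pvHit cs 3 = false := by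
  apply pvBoolExt
  simp only [pvHit, List.any_eq_true, beq_iff_eq]
  constructor
  · rintro ⟨c, hc, h⟩
    have := pvCat_mem h
    simp at this
  · intro h; cases h

lemma pvHit4 (cs : List Char) :
    pvHit cs 4 = (decide ('Q' ∈ cs) || decide ('?' ∈ cs)) := by
  apply pvBoolExt
  simp only [pvHit, List.any_eq_true, beq_iff_eq, Bool.or_eq_true, decide_eq_true_eq]
  constructor
  · rintro ⟨c, hc, h⟩
    have := pvCat_mem h
    simp at this
    rcases this with rfl|rfl <;> tauto
  · rintro (h|h) <;> exact ⟨_, h, by decide⟩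

lemma pvHit5 (cs : List Char) :
    pvHit cs 5 = (decide ('*' ∈ cs) || decide ('U' ∈ cs) || decide ('W' ∈ cs) ||
                  decide ('w' ∈ cs) || decide ('+' ∈ cs) || decide ('l' ∈ cs) ||
                  decide ('L' ∈ cs) || decide ('o' ∈ cs)) := by
  apply pvBoolExt
  simp only [pvHit, List.any_eq_true, beq_iff_eq, Bool.or_eq_true, decide_eq_true_eq]
  constructor
  · rintro ⟨c, hc, h⟩
    have := pvCat_mem h
    simp at this
    rcases this with rfl|rfl|rfl|rfl|rfl|rfl|rfl|rfl <;> tauto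
  · rintro (((((((h|h)|h)|h)|h)|h)|h)|h) <;> exact ⟨_, h, by decide⟩

lemma pvHit6 (cs : List Char) : pvHit cs 6 = decide ('M' ∈ cs) := by
  apply pvBoolExt
  simp only [pvHit, List.any_eq_true, beq_iff_eq, decide_eq_true_eq]
  constructor
  · rintro ⟨c, hc, h⟩
    have := pvCat_mem h
    simp at this
    subst this; exact hc
  · intro h; exact ⟨_, h, by decide⟩

lemma pvHit7 (cs : List Char) :
    pvHit cs 7 = (decide ('T' ∈ cs) || decide ('C' ∈ cs)) := by
  apply pvBoolExt
  simp only [pvHit, List.any_eq_true, beq_iff_eq, Bool.or_eq_true, decide_eq_true_eq]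
  constructor
  · rintro ⟨c, hc, h⟩
    have := pvCat_mem h
    simp at this
    rcases this with rfl|rfl <;> tauto
  · rintro (h|h) <;> exact ⟨_, h, by decide⟩

lemma pvHit8 (cs : List Char) :
    pvHit cs 8 = (decide ('S' ∈ cs) || decide ('B' ∈ cs)) := by
  apply pvBoolExt
  simp only [pvHit, List.any_eq_true, beq_iff_eq, Bool.or_eq_true, decide_eq_true_eq]
  constructor
  · rintro ⟨c, hc, h⟩
    have := pvCat_mem h
    simp at this
    rcases this with rfl|rfl <;> tauto
  · rintro (h|h) <;> exact ⟨_, h, by decide⟩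

-- the door flag after the pass: all four door characters were seen
lemma pvDoorEq (cs : List Char) (l : List Bool) :
    PySem.Set.issubset pvDoorsB (cs.foldl pvStepB (l, PySem.Set.empty)).2
      = (decide ('[' ∈ cs) && decide (']' ∈ cs) && decide ('<' ∈ cs) && decide ('>' ∈ cs)) := by
  apply pvBoolExt
  rw [PySem.Set.issubset_iff]
  have hd : (pvDoorsB : List Char) = ['[', ']', '<', '>'] := by decide
  simp only [Bool.and_eq_true, decide_eq_true_eq]
  constructor
  · intro h
    have g : ∀ x, x ∈ (pvDoorsB : List Char) → x ∈ cs := by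
      intro x hx
      have hm := h x hx
      rw [pvFold_doors] at hm
      rcases hm with h'|h'
      · simp [PySem.Set.empty] at h'
      · exact h'.1
    exact ⟨⟨⟨g '[' (by rw [hd]; simp), g ']' (by rw [hd]; simp)⟩,
      g '<' (by rw [hd]; simp)⟩, g '>' (by rw [hd]; simp)⟩
  · rintro ⟨⟨⟨h1, h2⟩, h3⟩, h4⟩ x hx
    rw [pvFold_doors]
    rw [hd] at hx
    simp only [List.mem_cons, List.not_mem_nil, or_false] at hx
    rcases hx with rfl|rfl|rfl|rfl
    · exact Or.inr ⟨h1, by decide⟩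
    · exact Or.inr ⟨h2, by decide⟩
    · exact Or.inr ⟨h3, by decide⟩
    · exact Or.inr ⟨h4, by decide⟩

lemma pvB_eq (level : List (List String)) :
    get_label_blend_alt level =
      PySem.List.pySetD
        (((pvChars level).foldl pvStepB (List.replicate 9 false, PySem.Set.empty)).1) 3
        (PySem.Set.issubset pvDoorsB
          (((pvChars level).foldl pvStepB (List.replicate 9 false, PySem.Set.empty)).2)) := by
  show PySem.List.pySetD
      ((level.foldl (fun st row => row.foldl (fun st s => s.toList.foldl pvStepB st) st)
        (List.replicate 9 false, PySem.Set.empty)).1) 3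
      (PySem.Set.issubset pvDoorsB
        ((level.foldl (fun st row => row.foldl (fun st s => s.toList.foldl pvStepB st) st)
          (List.replicate 9 false, PySem.Set.empty)).2)) = _
  rw [pvLevelFold]

-- ===== VERDICT (by name: the statement is the Claim_ definition above) =====
theorem get_label_blend_spec : Claim_equal_get_label_blend := by
  intro level _
  unfold Spec_get_label_blend
  rw [pvA_eq, pvB_eq]
  simp only [pvTempEq]
  rw [pvFold_label, pvMapIdxRep, pvDoorEq]
  simp only [pvHit0, pvHit1, pvHit2, pvHit3, pvHit4, pvHit5, pvHit6, pvHit7, pvHit8,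
    pvIsIn_singleton]
  rfl
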